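-- pv_equiv track=rewrite | github.com/hyunjun/practice | python/problem-ETC/minimum_time_visiting_all_points.py | minTimeToVisitAllPoints0
-- ===== SOURCE A (Python) =====
-- def minTimeToVisitAllPoints0(points):
--     """
--     :type points: List[List[int]]
--     :rtype: int
--     """
--
--     def getCount(s, e):
--         c, cnt = s, 0
--         while c[0] != e[0] or c[1] != e[1]:
--             if c[0] < e[0]:
--                 c[0] += 1
--             elif c[0] > e[0]:
--                 c[0] -= 1
--             if c[1] < e[1]:
--                 c[1] += 1
--             elif c[1] > e[1]:
--                 c[1] -= 1
--             cnt += 1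
--         return cnt
--
--     return sum([getCount(points[i - 1], points[i]) for i in range(1, len(points))])
-- ===== SOURCE B (Python) =====
-- def minTimeToVisitAllPoints0(points):
--     """
--     :type points: List[List[int]]
--     :rtype: int
--     """
--     total = 0
--     for p, q in zip(points, points[1:]):
--         total += max(abs(q[0] - p[0]), abs(q[1] - p[1]))
--     return total
-- ===== Notes on version B (the rewrite author's own statement) =====
-- stated objective: faster
-- what changed: Replaces A's unit-step simulation loop (one iteration per grid step between each pair of points, mutating the input in place) by the closed-form Chebyshev distance max(|dx|,|dy|) summed over consecutive pairs in one pass; B does not mutate its argument.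
import Mathlib
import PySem

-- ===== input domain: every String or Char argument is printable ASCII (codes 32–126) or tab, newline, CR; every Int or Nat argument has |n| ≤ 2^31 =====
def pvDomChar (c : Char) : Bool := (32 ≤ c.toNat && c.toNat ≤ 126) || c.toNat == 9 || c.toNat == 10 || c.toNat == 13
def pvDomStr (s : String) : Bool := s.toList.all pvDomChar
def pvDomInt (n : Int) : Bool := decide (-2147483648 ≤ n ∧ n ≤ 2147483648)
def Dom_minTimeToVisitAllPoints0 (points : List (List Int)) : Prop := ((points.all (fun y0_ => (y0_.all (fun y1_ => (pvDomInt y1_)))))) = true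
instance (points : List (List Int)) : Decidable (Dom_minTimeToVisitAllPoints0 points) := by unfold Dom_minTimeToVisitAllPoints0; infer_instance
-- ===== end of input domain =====

-- B replaces A's unit-step walk between consecutive points by the closed-form Chebyshev
-- distance max(|dx|,|dy|) per pair (faster: one step per pair instead of one per grid unit).
-- NOTE: Python A mutates its argument `points` in place (drags each point onto the next);
-- B does not. The equivalence proved here is about the RETURN value only.

-- ===== PORT A =====
-- one step of the while-loop body on one coordinate
def pvStep (c e : Int) : Int := if c < e then c + 1 else if c > e then c - 1 else c

-- the `while c[0] != e[0] or c[1] != e[1]` loop of getCount, counting iterations;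
-- the fuel is only a totality guard (the loop needs max(|dx|,|dy|) ≤ fuel iterations)
def pvGetCountLoop : Nat → Int → Int → Int → Int → Int
  | 0, _, _, _, _ => 0
  | fuel + 1, c0, c1, e0, e1 =>
    if c0 ≠ e0 ∨ c1 ≠ e1 then
      pvGetCountLoop fuel (pvStep c0 e0) (pvStep c1 e1) e0 e1 + 1
    else 0

def pvGetCount (c0 c1 e0 e1 : Int) : Int :=
  pvGetCountLoop ((e0 - c0).natAbs + (e1 - c1).natAbs) c0 c1 e0 e1

-- points[i][j]; Pre_ guarantees the indices are in range, so the default 0 is never used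
def pvCoord (points : List (List Int)) (i j : Int) : Int :=
  PySem.List.pyGetD (PySem.List.pyGetD points i []) j 0

def minTimeToVisitAllPoints0 (points : List (List Int)) : Int :=
  ((PySem.List.pyRange 1 (points.length : Int) 1).map (fun i =>
      pvGetCount (pvCoord points (i - 1) 0) (pvCoord points (i - 1) 1)
                 (pvCoord points i 0) (pvCoord points i 1))).sum

-- ===== PORT B =====
-- `for p, q in zip(points, points[1:]): total += max(abs(q[0]-p[0]), abs(q[1]-p[1]))`
def minTimeToVisitAllPoints0_alt (points : List (List Int)) : Int :=
  (List.zip points (PySem.List.slice points (some 1) none)).foldl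
    (fun total pq =>
      total + max |pq.2.getD 0 0 - pq.1.getD 0 0| |pq.2.getD 1 0 - pq.1.getD 1 0|) 0

-- ===== PRECONDITION & SPEC =====
-- Pre_ excludes exactly the inputs on which Python A raises IndexError: a list of at least
-- two points one of which has fewer than two coordinates (B raises there as well).
def Pre_minTimeToVisitAllPoints0 (points : List (List Int)) : Prop :=
  points.length ≤ 1 ∨ ∀ p ∈ points, 2 ≤ p.length
instance (points : List (List Int)) : Decidable (Pre_minTimeToVisitAllPoints0 points) := by
  unfold Pre_minTimeToVisitAllPoints0; infer_instance

def pvWitness_minTimeToVisitAllPoints0 : List (List Int) := [[1, 1], [3, 4], [-1, 0]]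

def Spec_minTimeToVisitAllPoints0 (points : List (List Int)) (out : Int) : Prop := out = minTimeToVisitAllPoints0_alt points
instance (points : List (List Int)) (out : Int) : Decidable (Spec_minTimeToVisitAllPoints0 points out) := by unfold Spec_minTimeToVisitAllPoints0; infer_instance

-- ===== CLAIM (what is proved, stated in full; the proofs are below) =====
def Claim_equal_minTimeToVisitAllPoints0 : Prop := ∀ (points : List (List Int)), Dom_minTimeToVisitAllPoints0 points → Pre_minTimeToVisitAllPoints0 points → Spec_minTimeToVisitAllPoints0 points (minTimeToVisitAllPoints0 points)

-- ===== LEMMAS AND PROOFS =====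

lemma pvGetCountLoop_eq (fuel : Nat) (c0 c1 e0 e1 : Int)
    (h : max (e0 - c0).natAbs (e1 - c1).natAbs ≤ fuel) :
    pvGetCountLoop fuel c0 c1 e0 e1 = max |e0 - c0| |e1 - c1| := by
  induction fuel generalizing c0 c1 with
  | zero =>
    simp only [pvGetCountLoop, Int.abs_eq_natAbs]; omega
  | succ n ih =>
    simp only [pvGetCountLoop]
    split_ifs with hc
    · rw [ih (pvStep c0 e0) (pvStep c1 e1)
        (by simp only [pvStep]; split_ifs <;> omega)]
      simp only [pvStep]
      split_ifs <;> simp only [Int.abs_eq_natAbs] <;> omega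
    · push Not at hc
      simp only [Int.abs_eq_natAbs]; omega

-- A's unit-step walk between (c0,c1) and (e0,e1) takes exactly max(|dx|,|dy|) iterations
lemma pvGetCount_eq (c0 c1 e0 e1 : Int) :
    pvGetCount c0 c1 e0 e1 = max |e0 - c0| |e1 - c1| := by
  unfold pvGetCount
  exact pvGetCountLoop_eq _ _ _ _ _ (by omega)

-- the Chebyshev summand of one consecutive pair
def pvCheb (pq : List Int × List Int) : Int :=
  max |pq.2.getD 0 0 - pq.1.getD 0 0| |pq.2.getD 1 0 - pq.1.getD 1 0|

lemma pvCoord_natCast (points : List (List Int)) (k : Nat) (j : Int) :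
    pvCoord points (k : Int) j = PySem.List.pyGetD (points.getD k []) j 0 := by
  simp [pvCoord, PySem.List.pyGetD_natCast]

-- index-based consecutive pairs = zip with the tail
lemma map_range_eq_map_zip (points : List (List Int)) :
    (List.range (points.length - 1)).map (fun k =>
        pvCheb (points.getD k [], points.getD (k + 1) [])) =
      (points.zip (points.drop 1)).map pvCheb := by
  induction points with
  | nil => simp
  | cons p tl ih =>
    cases tl with
    | nil => simp
    | cons q rest =>
      simp only [List.length_cons, Nat.add_sub_cancel, List.range_succ_eq_map,
        List.map_cons, List.map_map, List.drop_one, List.tail_cons, List.zip_cons_cons]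
      refine List.cons_eq_cons.mpr ⟨rfl, ?_⟩
      simp only [List.length_cons, Nat.add_sub_cancel, List.drop_one, List.tail_cons] at ih
      rw [← ih]
      simp [Function.comp]

lemma alt_eq_sum (points : List (List Int)) :
    minTimeToVisitAllPoints0_alt points = ((points.zip (points.drop 1)).map pvCheb).sum := by
  unfold minTimeToVisitAllPoints0_alt
  rw [show PySem.List.slice points (some 1) none = points.drop 1 by
    simp [PySem.List.slice_from]]
  rw [PySem.List.foldl_add]
  simp only [Int.zero_add, List.drop_one]
  rfl

lemma a_eq_sum (points : List (List Int)) :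
    minTimeToVisitAllPoints0 points =
      ((List.range (points.length - 1)).map (fun k =>
        pvCheb (points.getD k [], points.getD (k + 1) []))).sum := by
  unfold minTimeToVisitAllPoints0
  rw [PySem.List.pyRange_one]
  rw [List.map_map]
  congr 1
  have hlen : ((points.length : Int) - 1).toNat = points.length - 1 := by omega
  rw [hlen]
  apply List.map_congr_left
  intro k hk
  simp only [Function.comp]
  have h1 : (1 : Int) + (k : Int) = ((k + 1 : Nat) : Int) := by push_cast; ring
  rw [h1]
  rw [show ((k + 1 : Nat) : Int) - 1 = ((k : Nat) : Int) by omega]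
  simp only [pvCoord_natCast, pvGetCount_eq, pvCheb, PySem.List.pyGetD_ofNat']

-- ===== VERDICT (by name: the statement is the Claim_ definition above) =====
theorem minTimeToVisitAllPoints0_spec : Claim_equal_minTimeToVisitAllPoints0 := by
  intro points _ _
  unfold Spec_minTimeToVisitAllPoints0
  rw [a_eq_sum, alt_eq_sum, map_range_eq_map_zip]
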